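-- pv_equiv track=rewrite | github.com/ktchow1/hackerrank | vector game.py | count_zero_subseq_sum
-- ===== SOURCE A (Python) =====
-- def count_zero_subseq_sum(vec) : # <O(N^2) cannot generalize to non-zero target
--     sub = [0]*len(vec)
--     for n in range(len(vec)-1,-1,-1) :
--         cum = 0
--         for m in range(n, len(vec)) :
--             cum = cum + vec[m]
--             if cum == 0 :
--                 if m+1 < len(vec) :
--                        sub[n] = 1 + sub[m+1]
--                 else : sub[n] = 1
--                 break
--     return sum(sub)
-- ===== SOURCE B (Python) =====
-- def count_zero_subseq_sum(vec):
--     # O(N): suffix sums + dict mapping suffix-sum value -> next index, right-to-left DP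
--     n = len(vec)
--     nxt = {0: n}          # suffix sum at index n is 0
--     sub = [0] * (n + 1)
--     s = 0
--     total = 0
--     for i in range(n - 1, -1, -1):
--         s += vec[i]
--         j = nxt.get(s)
--         if j is not None:
--             v = 1 + sub[j]
--             sub[i] = v
--             total += v
--         nxt[s] = i
--     return total
-- ===== Notes on version B (the rewrite author's own statement) =====
-- stated objective: faster
-- what changed: Replaces the quadratic restart-scan (for each start index, re-accumulate until the running sum hits zero) by a single right-to-left pass that maintains suffix sums and a dict from suffix-sum value to its next occurrence index, giving each greedy segment count in O(1).
import Mathlib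
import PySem

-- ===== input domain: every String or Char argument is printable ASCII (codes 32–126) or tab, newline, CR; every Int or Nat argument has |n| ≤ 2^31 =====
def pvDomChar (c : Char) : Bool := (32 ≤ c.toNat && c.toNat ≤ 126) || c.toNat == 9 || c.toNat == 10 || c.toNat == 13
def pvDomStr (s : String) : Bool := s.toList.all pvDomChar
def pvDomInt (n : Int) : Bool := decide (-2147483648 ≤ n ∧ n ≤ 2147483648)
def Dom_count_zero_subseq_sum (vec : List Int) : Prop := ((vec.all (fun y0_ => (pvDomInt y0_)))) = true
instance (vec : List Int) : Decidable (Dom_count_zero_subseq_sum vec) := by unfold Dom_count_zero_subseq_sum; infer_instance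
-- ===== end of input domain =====

-- B replaces A's quadratic restart-scan by one right-to-left pass with suffix sums
-- and a dict of next-occurrence indices (asymptotic speed-up, measured by the check).

-- ===== PORT A =====
-- inner 'for m in range(n, len(vec))' with break (early return of the updated sub)
def pvLoopA (vec : List Int) (n : Int) : List Int → Int → List Int → List Int
  | [], _, sub => sub
  | m :: rest, cum, sub =>
    let cum := cum + PySem.List.pyGetD vec m 0
    if cum = 0 then
      if m + 1 < (vec.length : Int) then
        PySem.List.pySetD sub n (1 + PySem.List.pyGetD sub (m + 1) 0)
      else
        PySem.List.pySetD sub n 1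
    else pvLoopA vec n rest cum sub

def count_zero_subseq_sum (vec : List Int) : Int :=
  let sub0 := List.replicate vec.length (0 : Int)
  let sub := (PySem.List.pyRange ((vec.length : Int) - 1) (-1) (-1)).foldl
    (fun sub n => pvLoopA vec n (PySem.List.pyRange n (vec.length : Int) 1) 0 sub) sub0
  sub.sum

-- ===== PORT B =====
-- state: (s, nxt, sub, total)
def pvStepB (vec : List Int) (st : Int × PySem.Dict Int Int × List Int × Int) (i : Int) :
    Int × PySem.Dict Int Int × List Int × Int :=
  let (s, nxt, sub, total) := st
  let s := s + PySem.List.pyGetD vec i 0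
  match nxt.get? s with
  | some j =>
    let v := 1 + PySem.List.pyGetD sub j 0
    (s, nxt.insert s i, PySem.List.pySetD sub i v, total + v)
  | none => (s, nxt.insert s i, sub, total)

def count_zero_subseq_sum_alt (vec : List Int) : Int :=
  let nxt : PySem.Dict Int Int := PySem.Dict.empty.insert 0 (vec.length : Int)
  let sub0 := List.replicate (vec.length + 1) (0 : Int)
  let st := (PySem.List.pyRange ((vec.length : Int) - 1) (-1) (-1)).foldl
    (pvStepB vec) (0, nxt, sub0, 0)
  st.2.2.2

-- ===== PRECONDITION & SPEC =====
def Spec_count_zero_subseq_sum (vec : List Int) (out : Int) : Prop := out = count_zero_subseq_sum_alt vec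
instance (vec : List Int) (out : Int) : Decidable (Spec_count_zero_subseq_sum vec out) := by unfold Spec_count_zero_subseq_sum; infer_instance

-- ===== CLAIM (what is proved, stated in full; the proofs are below) =====
def Claim_equal_count_zero_subseq_sum : Prop := ∀ (vec : List Int), Dom_count_zero_subseq_sum vec → Spec_count_zero_subseq_sum vec (count_zero_subseq_sum vec)

-- ===== LEMMAS AND PROOFS =====

-- suffix sum from index i
def pvS (vec : List Int) (i : ℕ) : Int := (vec.drop i).sum

-- first j in [a, len] with suffix sum p
def pvFind (vec : List Int) (p : Int) (a : ℕ) : Option ℕ :=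
  (List.range' a (vec.length + 1 - a)).find? (fun j => pvS vec j == p)

lemma pvFind_mem {vec : List Int} {p : Int} {a j : ℕ} (h : pvFind vec p a = some j) :
    a ≤ j ∧ j ≤ vec.length ∧ pvS vec j = p := by
  have hmem := List.find?_some h
  have hj := List.mem_of_find?_eq_some h
  rw [List.mem_range'_1] at hj
  refine ⟨hj.1, ?_, by simpa using hmem⟩
  omega

-- the greedy count of zero-sum segments starting at i
def pvSub (vec : List Int) (i : ℕ) : Int :=
  match h : pvFind vec (pvS vec i) (i + 1) with
  | none => 0
  | some j => 1 + pvSub vec j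
termination_by vec.length + 1 - i
decreasing_by
  have := pvFind_mem h
  omega

lemma pvSub_len (vec : List Int) : pvSub vec vec.length = 0 := by
  rw [pvSub]
  have h : pvFind vec (pvS vec vec.length) (vec.length + 1) = none := by
    unfold pvFind
    simp
  split
  · rfl
  · rename_i j hj
    rw [h] at hj
    exact absurd hj (by simp)

-- the common mathematical value
def pvTotal (vec : List Int) : Int := ((List.range vec.length).map (pvSub vec)).sum

lemma pvSub_eq (vec : List Int) (i : ℕ) :
    pvSub vec i = (match pvFind vec (pvS vec i) (i + 1) with
      | none => 0
      | some j => 1 + pvSub vec j) := by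
  rw [pvSub]
  split <;> rename_i h <;> simp [h]

-- partially-filled sub array: entries ≥ k already hold the greedy count
def pvArr (vec : List Int) (L k : ℕ) : List Int :=
  (List.range L).map (fun i => if k ≤ i then pvSub vec i else 0)

lemma pvArr_length (vec : List Int) (L k : ℕ) : (pvArr vec L k).length = L := by
  simp [pvArr]

lemma pvArr_pyGetD (vec : List Int) (L k j : ℕ) (hj : j < L) :
    PySem.List.pyGetD (pvArr vec L k) (j : Int) 0 = if k ≤ j then pvSub vec j else 0 := by
  rw [PySem.List.pyGetD_natCast]
  rw [List.getD_eq_getElem _ _ (by simpa [pvArr_length] using hj)]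
  simp [pvArr]

lemma pvArr_succ_of_zero (vec : List Int) (L k : ℕ) (h : pvSub vec k = 0) :
    pvArr vec L (k + 1) = pvArr vec L k := by
  unfold pvArr
  apply List.map_congr_left
  intro i _
  by_cases hik : i = k
  · subst hik; simp [h]
  · by_cases hk : k ≤ i
    · have : k + 1 ≤ i := by omega
      simp [hk, this]
    · have : ¬ (k + 1 ≤ i) := by omega
      simp [hk, this]

lemma pvArr_set (vec : List Int) (L k : ℕ) (_hk : k < L) :
    (pvArr vec L (k + 1)).set k (pvSub vec k) = pvArr vec L k := by
  apply List.ext_getElem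
  · simp [pvArr_length]
  · intro i h1 h2
    have hiL : i < L := by simpa [pvArr_length] using h2
    rw [List.getElem_set]
    by_cases hik : i = k
    · simp [hik, pvArr]
    · have : ¬ (k = i) := fun h => hik h.symm
      simp only [this, if_false]
      simp only [pvArr, List.getElem_map, List.getElem_range]
      by_cases hki : k ≤ i
      · have : k + 1 ≤ i := by omega
        simp [hki, this]
      · have : ¬ (k + 1 ≤ i) := by omega
        simp [hki, this]

lemma pvArr_replicate (vec : List Int) (L : ℕ) (hL : L = vec.length ∨ L = vec.length + 1) :
    List.replicate L (0 : Int) = pvArr vec L vec.length := by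
  apply List.ext_getElem
  · simp [pvArr_length]
  · intro i h1 h2
    have hiL : i < L := by simpa using h1
    simp only [List.getElem_replicate, pvArr, List.getElem_map, List.getElem_range]
    by_cases h : vec.length ≤ i
    · have : i = vec.length := by omega
      subst this
      simp [pvSub_len]
    · simp [h]

lemma pvS_drop_cons (vec : List Int) (a : ℕ) (ha : a < vec.length) :
    pvS vec a = vec[a] + pvS vec (a + 1) := by
  unfold pvS
  conv_lhs => rw [← List.getElem_cons_drop (h := ha)]
  rw [List.sum_cons]

lemma pvFind_top (vec : List Int) (p : Int) : pvFind vec p (vec.length + 1) = none := by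
  unfold pvFind
  simp

lemma pvFind_cons (vec : List Int) (p : Int) (a : ℕ) (ha : a ≤ vec.length) :
    pvFind vec p a = (if pvS vec a = p then some a else pvFind vec p (a + 1)) := by
  unfold pvFind
  have : vec.length + 1 - a = (vec.length + 1 - (a + 1)) + 1 := by omega
  rw [this, List.range'_succ, List.find?_cons]
  by_cases h : pvS vec a = p
  · simp [h]
  · have hb : (pvS vec a == p) = false := by simp [h]
    simp [hb, h]

-- ===== A side =====

lemma loopA_spec (vec : List Int) (n : ℕ) (_hn : n < vec.length) :
    ∀ d a (sub : List Int), d = vec.length - a → n ≤ a → a ≤ vec.length →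
    pvLoopA vec (n : Int) (PySem.List.pyRange (a : Int) (vec.length : Int) 1)
        (pvS vec n - pvS vec a) sub =
      (match pvFind vec (pvS vec n) (a + 1) with
       | none => sub
       | some j => PySem.List.pySetD sub (n : Int)
           (if j < vec.length then 1 + PySem.List.pyGetD sub (j : Int) 0 else 1)) := by
  intro d
  induction d with
  | zero =>
    intro a sub hd ha hal
    have ha' : a = vec.length := by omega
    subst ha'
    rw [PySem.List.pyRange_one_eq_nil (le_refl _)]
    rw [pvFind_top]
    rfl
  | succ d ih =>
    intro a sub hd ha hal
    have hav : a < vec.length := by omega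
    rw [PySem.List.pyRange_one_cons (by exact_mod_cast hav)]
    show pvLoopA vec (n : Int) ((a : Int) :: PySem.List.pyRange ((a : Int) + 1) (vec.length : Int) 1) (pvS vec n - pvS vec a) sub = _
    rw [pvLoopA]
    have hget : PySem.List.pyGetD vec (a : Int) 0 = vec[a] := by
      rw [PySem.List.pyGetD_natCast, List.getD_eq_getElem _ _ hav]
    have hcum : pvS vec n - pvS vec a + PySem.List.pyGetD vec (a : Int) 0
        = pvS vec n - pvS vec (a + 1) := by
      rw [hget, pvS_drop_cons vec a hav]; ring
    by_cases hz : pvS vec (a + 1) = pvS vec n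
    · have hfind : pvFind vec (pvS vec n) (a + 1) = some (a + 1) := by
        rw [pvFind_cons vec _ (a + 1) (by omega), if_pos hz]
      have hcz : pvS vec n - pvS vec a + PySem.List.pyGetD vec (a : Int) 0 = 0 := by
        rw [hcum, hz]; ring
      rw [hcz, if_pos rfl]
      simp only [hfind]
      by_cases hlt : a + 1 < vec.length
      · have hlt' : (a : Int) + 1 < (vec.length : Int) := by exact_mod_cast hlt
        rw [if_pos hlt', if_pos hlt]
        norm_cast
      · have hlt' : ¬ ((a : Int) + 1 < (vec.length : Int)) := by exact_mod_cast hlt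
        rw [if_neg hlt', if_neg hlt]
    · have hfind : pvFind vec (pvS vec n) (a + 1) = pvFind vec (pvS vec n) (a + 2) := by
        rw [pvFind_cons vec _ (a + 1) (by omega), if_neg hz]
      have hcz : pvS vec n - pvS vec a + PySem.List.pyGetD vec (a : Int) 0 ≠ 0 := by
        rw [hcum]
        intro h
        exact hz (by linarith)
      rw [if_neg hcz, hcum, hfind]
      have := ih (a + 1) sub (by omega) (by omega) (by omega)
      rw [show pvFind vec (pvS vec n) (a + 1 + 1) = pvFind vec (pvS vec n) (a + 2) from by norm_num] at this
      push_cast at this ⊢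
      exact this

lemma stepA_spec (vec : List Int) (k : ℕ) (hk : k < vec.length) :
    pvLoopA vec (k : Int) (PySem.List.pyRange (k : Int) (vec.length : Int) 1) 0
        (pvArr vec vec.length (k + 1)) = pvArr vec vec.length k := by
  have h0 : (0 : Int) = pvS vec k - pvS vec k := by ring
  rw [h0, loopA_spec vec k hk (vec.length - k) k _ rfl (le_refl _) (by omega)]
  rcases hfind : pvFind vec (pvS vec k) (k + 1) with _ | j
  · show pvArr vec vec.length (k + 1) = pvArr vec vec.length k
    apply pvArr_succ_of_zero
    rw [pvSub_eq vec k]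
    simp only [hfind]
  · obtain ⟨hj1, hj2, hj3⟩ := pvFind_mem hfind
    have hsub : pvSub vec k = 1 + pvSub vec j := by
      rw [pvSub_eq vec k]
      simp only [hfind]
    have hval : (if j < vec.length then 1 + PySem.List.pyGetD (pvArr vec vec.length (k + 1)) (j : Int) 0 else 1) = pvSub vec k := by
      by_cases hjl : j < vec.length
      · rw [if_pos hjl, pvArr_pyGetD vec _ _ _ hjl, if_pos (by omega), hsub]
      · have hje : j = vec.length := by omega
        rw [if_neg hjl, hsub, hje, pvSub_len]
        norm_num
    show PySem.List.pySetD (pvArr vec vec.length (k + 1)) (k : Int)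
        (if j < vec.length then 1 + PySem.List.pyGetD (pvArr vec vec.length (k + 1)) (j : Int) 0 else 1)
      = pvArr vec vec.length k
    rw [hval, PySem.List.pySetD_natCast, pvArr_set vec _ k hk]

lemma outerA (vec : List Int) :
    ∀ k, k ≤ vec.length →
    (PySem.List.pyRange ((k : Int) - 1) (-1) (-1)).foldl
      (fun sub n => pvLoopA vec n (PySem.List.pyRange n (vec.length : Int) 1) 0 sub)
      (pvArr vec vec.length k) = pvArr vec vec.length 0 := by
  intro k
  induction k with
  | zero =>
    intro _
    rw [PySem.List.pyRange_neg_one_eq_nil (by norm_num)]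
    rfl
  | succ k ih =>
    intro hk
    have hcast : ((k + 1 : ℕ) : Int) - 1 = (k : Int) := by push_cast; ring
    rw [hcast, PySem.List.pyRange_neg_one_cons (by exact_mod_cast Int.lt_of_lt_of_le (by norm_num) (Int.natCast_nonneg k))]
    rw [List.foldl_cons]
    have hstep := stepA_spec vec k (by omega)
    rw [hstep]
    exact ih (by omega)

theorem countA_eq (vec : List Int) : count_zero_subseq_sum vec = pvTotal vec := by
  have h : count_zero_subseq_sum vec
      = ((PySem.List.pyRange ((vec.length : Int) - 1) (-1) (-1)).foldl
          (fun sub n => pvLoopA vec n (PySem.List.pyRange n (vec.length : Int) 1) 0 sub)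
          (List.replicate vec.length (0 : Int))).sum := rfl
  rw [h, pvArr_replicate vec vec.length (Or.inl rfl), outerA vec vec.length (le_refl _)]
  unfold pvTotal pvArr
  simp

-- ===== B side =====

lemma nxt_inv_step (vec : List Int) (k : ℕ) (hk : k < vec.length)
    (nxt : PySem.Dict Int Int)
    (hinv : ∀ p, nxt.get? p = (pvFind vec p (k + 1)).map (fun j => (j : Int))) :
    ∀ p, (nxt.insert (pvS vec k) (k : Int)).get? p
      = (pvFind vec p k).map (fun j => (j : Int)) := by
  intro p
  rw [PySem.Dict.get?_insert]
  rw [pvFind_cons vec p k (by omega)]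
  by_cases h : pvS vec k = p
  · simp [h]
  · have h' : p ≠ pvS vec k := fun hh => h hh.symm
    simp only [if_neg h', if_neg h]
    exact hinv p

lemma outerB (vec : List Int) :
    ∀ k, k ≤ vec.length → ∀ (s : Int) (nxt : PySem.Dict Int Int) (sub : List Int) (tot : Int),
    s = pvS vec k → sub = pvArr vec (vec.length + 1) k →
    (∀ p, nxt.get? p = (pvFind vec p k).map (fun j => (j : Int))) →
    ((PySem.List.pyRange ((k : Int) - 1) (-1) (-1)).foldl (pvStepB vec)
      (s, nxt, sub, tot)).2.2.2
      = tot + ((List.range k).map (pvSub vec)).sum := by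
  intro k
  induction k with
  | zero =>
    intro _ s nxt sub tot _ _ _
    rw [PySem.List.pyRange_neg_one_eq_nil (by norm_num)]
    simp
  | succ k ih =>
    intro hk s nxt sub tot hse hsube hinv
    subst hse hsube
    have hcast : ((k + 1 : ℕ) : Int) - 1 = (k : Int) := by push_cast; ring
    rw [hcast, PySem.List.pyRange_neg_one_cons (by exact_mod_cast Int.lt_of_lt_of_le (by norm_num) (Int.natCast_nonneg k))]
    rw [List.foldl_cons]
    have hkl : k < vec.length := by omega
    have hs : pvS vec (k + 1) + PySem.List.pyGetD vec (k : Int) 0 = pvS vec k := by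
      have hget : PySem.List.pyGetD vec (k : Int) 0 = vec[k] := by
        rw [PySem.List.pyGetD_natCast, List.getD_eq_getElem _ _ hkl]
      rw [hget, pvS_drop_cons vec k hkl]; ring
    have hget2 : (pvStepB vec (pvS vec (k + 1), nxt, pvArr vec (vec.length + 1) (k + 1), tot) (k : Int))
        = (pvS vec k, nxt.insert (pvS vec k) (k : Int), pvArr vec (vec.length + 1) k,
            tot + pvSub vec k) := by
      rcases hfind : pvFind vec (pvS vec k) (k + 1) with _ | j
      · have hd2 : nxt.get? (pvS vec k) = none := by
          rw [hinv, hfind]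
          rfl
        have hz : pvSub vec k = 0 := by
          rw [pvSub_eq vec k]
          simp only [hfind]
        simp only [pvStepB, hs, hd2]
        rw [pvArr_succ_of_zero vec _ k hz, hz, add_zero]
      · have hd2 : nxt.get? (pvS vec k) = some ((j : ℕ) : Int) := by
          rw [hinv, hfind]
          rfl
        obtain ⟨hj1, hj2, hj3⟩ := pvFind_mem hfind
        have hval : 1 + PySem.List.pyGetD (pvArr vec (vec.length + 1) (k + 1)) (j : Int) 0
            = pvSub vec k := by
          rw [pvArr_pyGetD vec _ _ _ (by omega), if_pos (by omega)]
          rw [pvSub_eq vec k]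
          simp only [hfind]
        simp only [pvStepB, hs, hd2]
        rw [hval, PySem.List.pySetD_natCast, pvArr_set vec _ k (by omega)]
    rw [hget2]
    rw [ih (by omega) _ _ _ _ rfl rfl (nxt_inv_step vec k hkl nxt hinv)]
    rw [List.range_succ]
    simp
    ring

theorem countB_eq (vec : List Int) : count_zero_subseq_sum_alt vec = pvTotal vec := by
  have h : count_zero_subseq_sum_alt vec
      = ((PySem.List.pyRange ((vec.length : Int) - 1) (-1) (-1)).foldl (pvStepB vec)
          ((0 : Int), PySem.Dict.empty.insert 0 (vec.length : Int),
            List.replicate (vec.length + 1) (0 : Int), (0 : Int))).2.2.2 := rfl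
  have hinv : ∀ p, (PySem.Dict.empty.insert 0 (vec.length : Int)).get? p
      = (pvFind vec p vec.length).map (fun j => (j : Int)) := by
    intro p
    rw [PySem.Dict.get?_insert]
    rw [pvFind_cons vec p vec.length (le_refl _), pvFind_top]
    have hS : pvS vec vec.length = 0 := by simp [pvS]
    by_cases h : p = 0
    · simp [h, hS]
    · have : ¬ (pvS vec vec.length = p) := by rw [hS]; exact fun hh => h hh.symm
      simp [h, this]
  rw [h, outerB vec vec.length (le_refl _) 0 _ _ 0 (by simp [pvS])
        (pvArr_replicate vec (vec.length + 1) (Or.inr rfl)) hinv]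
  unfold pvTotal
  simp

-- ===== VERDICT (by name: the statement is the Claim_ definition above) =====
theorem count_zero_subseq_sum_spec : Claim_equal_count_zero_subseq_sum := by
  intro vec _
  unfold Spec_count_zero_subseq_sum
  rw [countA_eq, countB_eq]
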